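-- pv_equiv track=rewrite | github.com/TehBigA/discooord | discooord/extras/utils.py | parse_argument_string
-- ===== SOURCE A (Python) =====
-- def parse_argument_string(s):
--     output = []
--     quote = None
--     escape = 0
--     argument = ''
--
--     for i, c in enumerate(s):
--         if c == '\\':
--             if escape % 2 == 1:
--                 escape -= 1
--                 argument += c
--             else:
--                 escape += 1
--         elif c in '\'"':
--             if escape % 2 == 1:
--                 escape -= 1
--                 argument += c
--             elif c == quote:
--                 quote = None
--                 output.append(argument)
--                 argument = ''
--             elif quote is None:
--                 quote = c
--             else:
--                 argument += c
--         elif c == ' ' and quote is None: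
--             if escape % 2 == 1:
--                 escape -= 1
--                 argument += c
--             elif argument:
--                 output.append(argument)
--                 argument = ''
--         else:
--             if escape % 2 == 1:
--                 escape -= 1
--                 # TODO: Escape chars
--             argument += c
--
--     if argument:
--         output.append(argument)
--
--     return output
-- ===== SOURCE B (Python) =====
-- def parse_argument_string(s):
--     output = []
--     argument = ''
--     n = len(s)
--     i = 0
--     while i < n:
--         c = s[i]
--         if c == '\\':
--             if i + 1 < n:
--                 argument += s[i + 1]
--             i += 2
--         elif c in '\'"':
--             # quoted section: a dedicated inner loop consumes up to the matching quote
--             i += 1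
--             while i < n:
--                 d = s[i]
--                 if d == '\\':
--                     if i + 1 < n:
--                         argument += s[i + 1]
--                     i += 2
--                 elif d == c:
--                     break
--                 else:
--                     argument += d
--                     i += 1
--             if i < n:  # closing quote found: emit the argument (even if empty)
--                 output.append(argument)
--                 argument = ''
--                 i += 1
--         elif c == ' ':
--             if argument:
--                 output.append(argument)
--                 argument = ''
--             i += 1
--         else:
--             argument += c
--             i += 1
--     if argument:
--         output.append(argument)
--     return output
-- ===== Notes on version B (the rewrite author's own statement) =====
-- stated objective: alternative
-- what changed: Replaces the single state machine (quote variable + escape counter carried through every branch) by a two-level loop: quoted sections are consumed by a dedicated inner loop, so the parsing mode lives in control flow, and escapes are handled locally by index lookahead instead of a carried flag.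
import Mathlib
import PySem

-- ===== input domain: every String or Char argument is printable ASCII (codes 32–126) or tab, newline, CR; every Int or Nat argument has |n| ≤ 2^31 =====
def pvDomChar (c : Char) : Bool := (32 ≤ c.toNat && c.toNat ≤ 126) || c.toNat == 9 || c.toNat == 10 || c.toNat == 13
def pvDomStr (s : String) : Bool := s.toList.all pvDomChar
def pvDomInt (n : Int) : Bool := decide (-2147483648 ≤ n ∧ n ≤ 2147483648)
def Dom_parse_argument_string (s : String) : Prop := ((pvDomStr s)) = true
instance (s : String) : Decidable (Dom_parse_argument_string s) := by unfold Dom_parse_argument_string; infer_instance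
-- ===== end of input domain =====

-- B replaces A's single state machine (quote variable + escape counter) by a two-level loop:
-- quoted sections are consumed by a dedicated inner loop and escapes are handled by lookahead;
-- same O(n) cost, different decomposition (the parsing mode lives in control flow, not in state).

-- ===== PORT A =====
-- state: (output, quote, escape, argument); argument kept as List Char, turned into String on append
def pvStepA (st : List String × Option Char × Int × List Char) (c : Char) :
    List String × Option Char × Int × List Char :=
  let (output, quote, escape, argument) := st
  if c = '\\' then
    if escape % 2 == 1 then (output, quote, escape - 1, argument ++ [c])
    else (output, quote, escape + 1, argument)
  else if c = '\'' ∨ c = '"' then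
    if escape % 2 == 1 then (output, quote, escape - 1, argument ++ [c])
    else if some c = quote then (output ++ [String.mk argument], none, escape, [])
    else if quote = none then (output, some c, escape, argument)
    else (output, quote, escape, argument ++ [c])
  else if c = ' ' ∧ quote = none then
    if escape % 2 == 1 then (output, quote, escape - 1, argument ++ [c])
    else if argument ≠ [] then (output ++ [String.mk argument], quote, escape, [])
    else (output, quote, escape, argument)
  else
    let escape' := if escape % 2 == 1 then escape - 1 else escape
    (output, quote, escape', argument ++ [c])

def parse_argument_string (s : String) : List String :=
  let fin := s.toList.foldl pvStepA ([], none, (0 : Int), [])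
  let (output, _, _, argument) := fin
  if argument ≠ [] then output ++ [String.mk argument] else output

-- ===== PORT B =====
-- inner while loop: consumes a quoted section opened by q;
-- returns (argument', remaining-after-closing-quote, closed?)
def pvInner (q : Char) : List Char → List Char → List Char × List Char × Bool
  | [], argument => (argument, [], false)
  | d :: rest, argument =>
      if d = '\\' then
        match rest with
        | [] => (argument, [], false)          -- i+2 jumps past the end: loop exits unclosed
        | e :: rest' => pvInner q rest' (argument ++ [e])
      else if d = q then (argument, rest, true)
      else pvInner q rest (argument ++ [d])

-- the returned remainder never grows (needed for the outer loop's termination)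
lemma pvInner_length (q : Char) : ∀ (n : Nat) (l : List Char), l.length ≤ n → ∀ (argument : List Char),
    (pvInner q l argument).2.1.length ≤ l.length := by
  intro n
  induction n with
  | zero =>
      intro l hl a
      have : l = [] := List.eq_nil_of_length_eq_zero (Nat.le_zero.mp hl)
      subst this; simp [pvInner]
  | succ n ih =>
      intro l hl a
      cases l with
      | nil => simp [pvInner]
      | cons d rest =>
          have hrest : rest.length ≤ n := Nat.le_of_succ_le_succ hl
          by_cases hd : d = '\\'
          · subst hd
            cases rest with
            | nil => simp [pvInner]
            | cons e rest' =>
                rw [pvInner.eq_def]; simp only [if_pos rfl]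
                have := ih rest' (Nat.le_of_succ_le hrest) (a ++ [e])
                simp at this ⊢; omega
          · by_cases hq : d = q
            · subst hq; rw [pvInner.eq_def]; simp [hd]
            · rw [pvInner.eq_def]; simp only [if_neg hd, if_neg hq]
              have := ih rest hrest (a ++ [d])
              simp at this ⊢; omega

-- outer while loop
def pvOuter : List Char → List String → List Char → List String
  | [], output, argument =>
      if argument ≠ [] then output ++ [String.mk argument] else output
  | c :: rest, output, argument =>
      if c = '\\' then
        match rest with
        | [] => if argument ≠ [] then output ++ [String.mk argument] else output
        | d :: rest' => pvOuter rest' output (argument ++ [d])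
      else if c = '\'' ∨ c = '"' then
        match h : pvInner c rest argument with
        | (arg', rest', true) => pvOuter rest' (output ++ [String.mk arg']) []
        | (arg', rest', false) => pvOuter rest' output arg'
      else if c = ' ' then
        if argument ≠ [] then pvOuter rest (output ++ [String.mk argument]) []
        else pvOuter rest output argument
      else pvOuter rest output (argument ++ [c])
termination_by l _ _ => l.length
decreasing_by
  · simp
  · have := pvInner_length c rest.length rest (Nat.le_refl _) argument
    rw [h] at this; simpa using Nat.lt_succ_of_le this
  · have := pvInner_length c rest.length rest (Nat.le_refl _) argument
    rw [h] at this; simpa using Nat.lt_succ_of_le this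
  · simp
  · simp
  · simp

def parse_argument_string_alt (s : String) : List String :=
  pvOuter s.toList [] []

-- ===== PRECONDITION & SPEC =====
def Spec_parse_argument_string (s : String) (out : List String) : Prop := out = parse_argument_string_alt s
instance (s : String) (out : List String) : Decidable (Spec_parse_argument_string s out) := by unfold Spec_parse_argument_string; infer_instance

-- ===== CLAIM (what is proved, stated in full; the proofs are below) =====
def Claim_equal_parse_argument_string : Prop := ∀ (s : String), Dom_parse_argument_string s → Spec_parse_argument_string s (parse_argument_string s)

-- ===== LEMMAS AND PROOFS =====

def pvFinish (st : List String × Option Char × Int × List Char) : List String :=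
  let (output, _, _, argument) := st
  if argument ≠ [] then output ++ [String.mk argument] else output

-- in the escaped state (escape = 1), A appends the next char literally, whatever it is
lemma pvStepA_escaped (output : List String) (quote : Option Char) (argument : List Char) (c : Char) :
    pvStepA (output, quote, 1, argument) c = (output, quote, 0, argument ++ [c]) := by
  simp only [pvStepA]
  split_ifs <;> simp_all

-- A's fold through an open quote q matches B's inner loop
lemma pv_inner_sim (q : Char) (hq : q = '\'' ∨ q = '"') :
    ∀ (n : Nat) (l : List Char), l.length ≤ n → ∀ (output : List String) (argument : List Char),
    pvFinish (l.foldl pvStepA (output, some q, (0 : Int), argument)) =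
      (match pvInner q l argument with
       | (arg', rest', true) =>
           pvFinish (rest'.foldl pvStepA (output ++ [String.mk arg'], none, (0 : Int), []))
       | (arg', _, false) =>
           if arg' ≠ [] then output ++ [String.mk arg'] else output) := by
  intro n
  induction n with
  | zero =>
      intro l hl output a
      have : l = [] := List.eq_nil_of_length_eq_zero (Nat.le_zero.mp hl)
      subst this; simp [pvInner, pvFinish]
  | succ n ih =>
      intro l hl output a
      cases l with
      | nil => simp [pvInner, pvFinish]
      | cons d rest =>
          have hrest : rest.length ≤ n := Nat.le_of_succ_le_succ hl
          by_cases hd : d = '\\'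
          · subst hd
            have hstep : pvStepA (output, some q, (0:Int), a) '\\' = (output, some q, 1, a) := by
              simp [pvStepA]
            cases rest with
            | nil => simp [List.foldl, hstep, pvInner, pvFinish]
            | cons e rest' =>
                simp only [List.foldl_cons, hstep, pvStepA_escaped]
                rw [pvInner.eq_def]; simp only [if_pos rfl]
                exact ih rest' (Nat.le_of_succ_le hrest) output (a ++ [e])
          · by_cases hdq : d = q
            · subst hdq
              have hstep : pvStepA (output, some d, (0:Int), a) d =
                  (output ++ [String.mk a], none, 0, []) := by
                simp [pvStepA, hd]
                rcases hq with h | h <;> simp [h]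
              rw [pvInner.eq_def]
              simp [hd, List.foldl_cons, hstep]
            · have hdq' : ¬ some d = some q := by simpa using hdq
              have hstep : pvStepA (output, some q, (0:Int), a) d =
                  (output, some q, 0, a ++ [d]) := by
                by_cases hquote : d = '\'' ∨ d = '"'
                · simp [pvStepA, hd, hdq']
                · have hsp : ¬ (d = ' ' ∧ (some q : Option Char) = none) := by simp
                  simp [pvStepA, hd, hquote, hsp]
              simp only [List.foldl_cons, hstep]
              rw [pvInner.eq_def]; simp only [if_neg hd, if_neg hdq]
              exact ih rest hrest output (a ++ [d])

-- an unclosed quoted section consumes the rest of the input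
lemma pvInner_false_nil (q : Char) : ∀ (n : Nat) (l : List Char), l.length ≤ n → ∀ (argument : List Char),
    (pvInner q l argument).2.2 = false → (pvInner q l argument).2.1 = [] := by
  intro n
  induction n with
  | zero =>
      intro l hl a _
      have : l = [] := List.eq_nil_of_length_eq_zero (Nat.le_zero.mp hl)
      subst this; simp [pvInner]
  | succ n ih =>
      intro l hl a hfalse
      cases l with
      | nil => simp [pvInner]
      | cons d rest =>
          have hrest : rest.length ≤ n := Nat.le_of_succ_le_succ hl
          by_cases hd : d = '\\'
          · subst hd
            cases rest with
            | nil => simp [pvInner]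
            | cons e rest' =>
                rw [pvInner.eq_def] at hfalse ⊢; simp only [if_pos rfl] at hfalse ⊢
                exact ih rest' (Nat.le_of_succ_le hrest) (a ++ [e]) hfalse
          · by_cases hq : d = q
            · subst hq
              rw [pvInner.eq_def] at hfalse; simp [hd] at hfalse
            · rw [pvInner.eq_def] at hfalse ⊢; simp only [if_neg hd, if_neg hq] at hfalse ⊢
              exact ih rest hrest (a ++ [d]) hfalse

-- the main simulation, outside quotes: A's fold equals B's outer loop
lemma pv_main : ∀ (n : Nat) (l : List Char), l.length ≤ n → ∀ (output : List String) (argument : List Char),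
    pvFinish (l.foldl pvStepA (output, none, (0 : Int), argument)) = pvOuter l output argument := by
  intro n
  induction n with
  | zero =>
      intro l hl output argument
      have : l = [] := List.eq_nil_of_length_eq_zero (Nat.le_zero.mp hl)
      subst this
      rw [pvOuter.eq_def]; simp [pvFinish]
  | succ n ih =>
      intro l hl output argument
      cases l with
      | nil => rw [pvOuter.eq_def]; simp [pvFinish]
      | cons c rest =>
        have hrest : rest.length ≤ n := Nat.le_of_succ_le_succ hl
        simp only [List.foldl_cons]
        by_cases hb : c = '\\'
        · subst hb
          have hstep : pvStepA (output, none, (0:Int), argument) '\\' = (output, none, 1, argument) := by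
            simp [pvStepA]
          rw [hstep]
          cases rest with
          | nil => rw [pvOuter.eq_def]; simp [pvFinish]
          | cons d rest' =>
              have hr : pvOuter ('\\' :: d :: rest') output argument
                  = pvOuter rest' output (argument ++ [d]) := by
                rw [pvOuter.eq_def]; simp
              rw [hr, List.foldl_cons, pvStepA_escaped]
              exact ih rest' (Nat.le_of_succ_le hrest) output (argument ++ [d])
        · by_cases hqc : c = '\'' ∨ c = '"'
          · have hstep : pvStepA (output, none, (0:Int), argument) c
                = (output, some c, 0, argument) := by
              simp [pvStepA, hb]
              rcases hqc with h | h <;> simp [h]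
            rw [hstep]
            have hsim := pv_inner_sim c hqc rest.length rest (Nat.le_refl _) output argument
            rw [hsim]
            rw [pvOuter.eq_def]
            simp only [if_neg hb, if_pos hqc]
            rcases hres : pvInner c rest argument with ⟨arg', rest', closed⟩
            cases closed with
            | true =>
                simp only [hres]
                have hlen : rest'.length ≤ rest.length := by
                  have := pvInner_length c rest.length rest (Nat.le_refl _) argument
                  rw [hres] at this; simpa using this
                exact ih rest' (Nat.le_trans hlen hrest) _ []
            | false =>
                simp only [hres]
                have hnil : rest' = [] := by
                  have := pvInner_false_nil c rest.length rest (Nat.le_refl _) argument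
                  rw [hres] at this; simpa using this
                subst hnil
                rw [pvOuter.eq_def]
          · by_cases hsp : c = ' '
            · subst hsp
              by_cases harg : argument = []
              · subst harg
                have hstep : pvStepA (output, none, (0:Int), ([] : List Char)) ' '
                    = (output, none, 0, []) := by simp [pvStepA]
                have hr : pvOuter (' ' :: rest) output []
                    = pvOuter rest output [] := by
                  rw [pvOuter.eq_def]; simp
                rw [hr, hstep]
                exact ih rest hrest output []
              · have hstep : pvStepA (output, none, (0:Int), argument) ' '
                    = (output ++ [String.mk argument], none, 0, []) := by
                  simp [pvStepA, harg]
                have hr : pvOuter (' ' :: rest) output argument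
                    = pvOuter rest (output ++ [String.mk argument]) [] := by
                  rw [pvOuter.eq_def]; simp [harg]
                rw [hr, hstep]
                exact ih rest hrest _ []
            · have hstep : pvStepA (output, none, (0:Int), argument) c
                  = (output, none, 0, argument ++ [c]) := by
                simp [pvStepA, hb, hqc, hsp]
              have hr : pvOuter (c :: rest) output argument
                  = pvOuter rest output (argument ++ [c]) := by
                rw [pvOuter.eq_def]; simp [hb, hqc, hsp]
              rw [hr, hstep]
              exact ih rest hrest output (argument ++ [c])

-- ===== VERDICT (by name: the statement is the Claim_ definition above) =====
theorem parse_argument_string_spec : Claim_equal_parse_argument_string := by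
  intro s _
  unfold Spec_parse_argument_string parse_argument_string parse_argument_string_alt
  have := pv_main s.toList.length s.toList (Nat.le_refl _) [] []
  simpa [pvFinish] using this
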